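-- pv_equiv track=rewrite | github.com/razofera/Yeast_Display | hla_screen_knownBinders/hla_screen_cmd.py | find_matching_sequences
-- ===== SOURCE A (Python) =====
-- def find_matching_sequences(fasta_sequences, query_sequences):
--     matched_sequences = {}
--     for header, sequence in fasta_sequences.items():
--         for query in query_sequences:
--             if query in sequence:
--                 matched_sequences[sequence] = header
--                 break
--     return matched_sequences
-- ===== SOURCE B (Python) =====
-- def find_matching_sequences(fasta_sequences, query_sequences):
--     # Sieve: successively filter a worklist of (index, sequence) pairs by each
--     # query (stopping early once it is empty); whatever survives every query is
--     # unmatched, and the result dict is rebuilt in the original fasta order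
--     # from everything else.
--     items = list(fasta_sequences.items())
--     unmatched = [(i, pair[1]) for i, pair in enumerate(items)]
--     for query in query_sequences:
--         if not unmatched:
--             break
--         unmatched = [p for p in unmatched if query not in p[1]]
--     leftover = {p[0] for p in unmatched}
--     result = {}
--     for i, (header, sequence) in enumerate(items):
--         if i not in leftover:
--             result[sequence] = header
--     return result
-- ===== Notes on version B (the rewrite author's own statement) =====
-- stated objective: alternative
-- what changed: B transposes the computation into a query-major sieve: it repeatedly filters a shrinking worklist of (index, sequence) pairs by each query (stopping once empty), takes the survivors as the unmatched set, and rebuilds the result dict in one pass over the fasta items, instead of A's per-sequence inner query scan with break.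
import Mathlib
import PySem

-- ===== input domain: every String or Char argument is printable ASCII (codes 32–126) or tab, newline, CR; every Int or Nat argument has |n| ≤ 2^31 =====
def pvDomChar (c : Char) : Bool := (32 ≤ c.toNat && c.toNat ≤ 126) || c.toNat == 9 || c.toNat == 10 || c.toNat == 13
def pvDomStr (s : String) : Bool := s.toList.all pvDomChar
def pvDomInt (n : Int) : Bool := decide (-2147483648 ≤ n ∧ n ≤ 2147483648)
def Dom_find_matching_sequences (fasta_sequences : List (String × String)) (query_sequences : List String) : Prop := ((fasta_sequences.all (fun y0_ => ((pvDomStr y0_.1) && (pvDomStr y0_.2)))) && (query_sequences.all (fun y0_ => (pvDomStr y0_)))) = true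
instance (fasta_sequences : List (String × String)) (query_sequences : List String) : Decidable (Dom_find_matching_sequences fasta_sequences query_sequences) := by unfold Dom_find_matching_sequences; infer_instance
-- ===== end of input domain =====

-- B replaces A's per-sequence inner query scan (with break) by a query-major sieve:
-- each query filters a shrinking worklist of (index, sequence) pairs; the survivors are the
-- unmatched items, and the result dict is rebuilt in one pass in the original fasta order.

-- ===== PORT A =====
-- inner 'for query in query_sequences: … break' loop of A
def findA_inner (d : PySem.Dict String String) (header sequence : String) : List String → PySem.Dict String String
  | [] => d
  | q :: rest =>
      if PySem.Str.isIn q sequence then d.insert sequence header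
      else findA_inner d header sequence rest

def find_matching_sequences (fasta_sequences : List (String × String)) (query_sequences : List String) : List (String × String) :=
  (fasta_sequences.foldl (fun d hs => findA_inner d hs.1 hs.2 query_sequences)
    (PySem.Dict.empty : PySem.Dict String String)).items

-- ===== PORT B =====
-- "unmatched = [p for p in unmatched if query not in p[1]]" per query, with the empty-worklist break
def findB_sieve (unmatched : List (Int × String)) : List String → List (Int × String)
  | [] => unmatched
  | q :: rest =>
      if unmatched.isEmpty then unmatched
      else findB_sieve (unmatched.filter (fun p => !PySem.Str.isIn q p.2)) rest

def find_matching_sequences_alt (fasta_sequences : List (String × String)) (query_sequences : List String) : List (String × String) :=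
  let items := fasta_sequences
  let unmatched := findB_sieve ((PySem.List.enumerate items).map (fun p => (p.1, p.2.2))) query_sequences
  let leftover := PySem.Set.ofList (unmatched.map (fun p => p.1))
  ((PySem.List.enumerate items).foldl (fun (d : PySem.Dict String String) p =>
      if !(PySem.Set.contains leftover p.1) then d.insert p.2.2 p.2.1 else d) PySem.Dict.empty).items

-- ===== PRECONDITION & SPEC =====
def Spec_find_matching_sequences (fasta_sequences : List (String × String)) (query_sequences : List String) (out : List (String × String)) : Prop := out = find_matching_sequences_alt fasta_sequences query_sequences
instance (fasta_sequences : List (String × String)) (query_sequences : List String) (out : List (String × String)) : Decidable (Spec_find_matching_sequences fasta_sequences query_sequences out) := by unfold Spec_find_matching_sequences; infer_instance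

-- ===== CLAIM (what is proved, stated in full; the proofs are below) =====
def Claim_equal_find_matching_sequences : Prop := ∀ (fasta_sequences : List (String × String)) (query_sequences : List String), Dom_find_matching_sequences fasta_sequences query_sequences → Spec_find_matching_sequences fasta_sequences query_sequences (find_matching_sequences fasta_sequences query_sequences)

-- ===== LEMMAS AND PROOFS =====

-- A's inner break loop inserts iff some query occurs in the sequence
theorem findA_inner_eq (h s : String) : ∀ (qs : List String) (d : PySem.Dict String String),
    findA_inner d h s qs =
      if qs.any (fun q => PySem.Str.isIn q s) then d.insert s h else d := by
  intro qs
  induction qs with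
  | nil => intro d; simp [findA_inner]
  | cons q rest ih =>
      intro d
      simp only [findA_inner, List.any_cons, Bool.or_eq_true, ih]
      split_ifs <;> first | rfl | tauto

-- survivors of the sieve are exactly the worklist entries no query occurs in
theorem findB_sieve_mem : ∀ (qs : List String) (un : List (Int × String)) (p : Int × String),
    p ∈ findB_sieve un qs ↔ p ∈ un ∧ ∀ q ∈ qs, PySem.Str.isIn q p.2 = false := by
  intro qs
  induction qs with
  | nil => intro un p; simp [findB_sieve]
  | cons q rest ih =>
      intro un p
      by_cases hu : un.isEmpty = true
      · rw [List.isEmpty_iff] at hu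
        subst hu
        simp [findB_sieve]
      · rw [show findB_sieve un (q :: rest) =
            findB_sieve (un.filter (fun p => !PySem.Str.isIn q p.2)) rest by
              simp [findB_sieve, hu]]
        rw [ih, List.mem_filter]
        constructor
        · rintro ⟨⟨hp, hnq⟩, hrest⟩
          refine ⟨hp, fun q' hq' => ?_⟩
          rcases List.mem_cons.mp hq' with rfl | hq'
          · simpa using hnq
          · exact hrest q' hq'
        · rintro ⟨hp, hall⟩
          exact ⟨⟨hp, by simpa using hall q (List.mem_cons_self ..)⟩,
            fun q' hq' => hall q' (List.mem_cons_of_mem _ hq')⟩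

-- the rebuild pass over enumerate equals A's direct fold, given that the flag agrees index-wise
theorem rebuild_eq (qs : List String) (M : Int → Bool) :
    ∀ (fs : List (String × String)) (s : Int) (d : PySem.Dict String String),
    (∀ (k : Nat) (hk : k < fs.length), M (s + (k : Int)) = qs.any (fun q => PySem.Str.isIn q (fs[k]'hk).2)) →
    (PySem.List.enumerate fs s).foldl (fun d p => if M p.1 then d.insert p.2.2 p.2.1 else d) d =
      fs.foldl (fun d hs => if qs.any (fun q => PySem.Str.isIn q hs.2) then d.insert hs.2 hs.1 else d) d := by
  intro fs
  induction fs with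
  | nil => intro s d _; simp [PySem.List.enumerate_nil]
  | cons x xs ih =>
      intro s d hM
      rw [PySem.List.enumerate_cons, List.foldl_cons, List.foldl_cons]
      have h0 : M s = qs.any (fun q => PySem.Str.isIn q x.2) := by
        have := hM 0 (by simp)
        simpa using this
      rw [h0]
      exact ih (s + 1) _ (fun k hk => by
        have := hM (k + 1) (by simpa using Nat.succ_lt_succ hk)
        push_cast at this ⊢
        rw [show s + 1 + (k : Int) = s + ((k : Int) + 1) by ring]
        simpa using this)

-- ===== VERDICT (by name: the statement is the Claim_ definition above) =====
theorem find_matching_sequences_spec : Claim_equal_find_matching_sequences := by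
  intro fs qs _
  unfold Spec_find_matching_sequences find_matching_sequences find_matching_sequences_alt
  simp only [findA_inner_eq]
  set leftover := PySem.Set.ofList
      ((findB_sieve ((PySem.List.enumerate fs).map (fun p => (p.1, p.2.2))) qs).map (fun p => p.1))
    with hleftover
  refine congrArg PySem.Dict.items
    (Eq.symm (rebuild_eq qs (fun i => !(PySem.Set.contains leftover i)) fs 0 PySem.Dict.empty ?_))
  intro k hk
  have hmem : (0 + (k : Int)) ∈ leftover ↔
      ((0 : Int) + (k : Int), (fs[k]'hk).2) ∈
        findB_sieve ((PySem.List.enumerate fs).map (fun p => (p.1, p.2.2))) qs := by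
    rw [hleftover, PySem.Set.mem_ofList, List.mem_map]
    constructor
    · rintro ⟨p, hp, hpk⟩
      have hp0 := (findB_sieve_mem qs _ p).mp hp
      obtain ⟨r, hr, hrp⟩ := List.mem_map.mp hp0.1
      obtain ⟨k', hk', rfl⟩ := (PySem.List.mem_enumerate_iff fs 0 r).mp hr
      have hkk : k' = k := by
        subst hrp
        simp only at hpk
        omega
      subst hkk
      subst hrp
      simpa using hp
    · intro hp
      exact ⟨_, hp, rfl⟩
  by_cases hA : qs.any (fun q => PySem.Str.isIn q (fs[k]'hk).2) = true
  · rw [hA, Bool.not_eq_true', ← Bool.not_eq_true, PySem.Set.contains_iff]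
    intro hmem'
    have hsurv := (findB_sieve_mem qs _ _).mp (hmem.mp hmem')
    obtain ⟨q, hq, hqin⟩ := List.any_eq_true.mp hA
    have := hsurv.2 q hq
    simp only at this
    rw [hqin] at this
    exact Bool.true_eq_false.mp this
  · rw [eq_false_of_ne_true hA]
    have hall : ∀ q ∈ qs, PySem.Str.isIn q (fs[k]'hk).2 = false := by
      intro q hq
      by_contra hne
      exact hA (List.any_eq_true.mpr ⟨q, hq, by
        cases hb : PySem.Str.isIn q (fs[k]'hk).2
        · exact absurd hb hne
        · rfl⟩)
    have hin : ((0 : Int) + (k : Int), (fs[k]'hk).2) ∈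
        findB_sieve ((PySem.List.enumerate fs).map (fun p => (p.1, p.2.2))) qs := by
      refine (findB_sieve_mem qs _ _).mpr ⟨List.mem_map.mpr ⟨((0 : Int) + (k : Int), fs[k]'hk),
        (PySem.List.mem_enumerate_iff fs 0 _).mpr ⟨k, hk, rfl⟩, rfl⟩, fun q hq => hall q hq⟩
    have : PySem.Set.contains leftover (0 + (k : Int)) = true :=
      (PySem.Set.contains_iff _ _).mpr (hmem.mpr hin)
    simpa using this
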